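-- pv_equiv track=rewrite | github.com/A-Farhan/sequence_diversity_ecoli_TFs | utilities3/specific.py | order_pamat
-- ===== SOURCE A (Python) =====
-- def order_pamat( data):
--     # cluster identical rows
--     clusters = {}
--
--     # go through each row from top to bottom
--     for x in range(len(data)-1):
--
--         # check if the index has already been captured in a cluster
--         found = set( j for i in clusters.values() for j in i[1:])
--         if x in found: continue
--
--         # initiate a cluster(list) with the rowsum
--         clusters[x]=[ sum(data[x][1:])]
--
--         # make comparison with other rows excluding upstream rows
--         for y in range(x,len(data)):
--             if data[y][1:] == data[x][1:]:
--                 clusters[x].extend([y])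
--
--     # sort above cluster in decreasing order of their first value
--     soclust = sorted( clusters.values(), reverse = True)
--
--     # extract the order from sorted clusters
--     order = [ j for i in soclust for j in i[1:]]
--
--     # rearrage data in the order identified above
--     out = [ data[i] for i in order ]
--     return out
-- ===== SOURCE B (Python) =====
-- def order_pamat(data):
--     n = len(data)
--     # group row indices by the row tail (row[1:]) in one pass, in first-occurrence order
--     groups = {}
--     for i in range(n):
--         groups.setdefault(tuple(data[i][1:]), []).append(i)
--     # a tail whose first (hence only) occurrence is the last row never forms a cluster in A
--     clusters = [[sum(tail)] + idxs for tail, idxs in groups.items() if idxs[0] != n - 1]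
--     clusters.sort(reverse=True)
--     return [data[i] for c in clusters for i in c[1:]]
-- ===== Notes on version B (the rewrite author's own statement) =====
-- stated objective: faster
-- what changed: A's nested scans (a recomputed 'found' set and an inner full-row comparison loop per row) are replaced by a single dict pass grouping row indices by the row tail, then one filter and one sort.
import Mathlib
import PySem

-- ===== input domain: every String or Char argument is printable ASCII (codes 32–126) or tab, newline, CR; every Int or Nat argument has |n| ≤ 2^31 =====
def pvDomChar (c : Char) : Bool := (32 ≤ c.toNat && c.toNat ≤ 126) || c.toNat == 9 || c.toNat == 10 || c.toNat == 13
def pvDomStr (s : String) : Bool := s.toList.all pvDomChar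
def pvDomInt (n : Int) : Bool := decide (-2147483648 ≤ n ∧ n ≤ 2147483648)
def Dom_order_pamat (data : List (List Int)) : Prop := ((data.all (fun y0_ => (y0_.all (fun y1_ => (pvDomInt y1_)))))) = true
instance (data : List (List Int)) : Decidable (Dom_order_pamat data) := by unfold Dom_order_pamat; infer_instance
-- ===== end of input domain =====

-- B replaces A's quadratic scan-per-row clustering (with a recomputed 'found' set each pass)
-- by one dict pass grouping row indices by the row tail, then one sort: objective 'faster'.

-- ===== PORT A =====
def order_pamat (data : List (List Int)) : List (List Int) :=
  let clusters : PySem.Dict Int (List Int) :=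
    (PySem.List.pyRange 0 ((data.length : Int) - 1)).foldl (fun clusters x =>
      let found : PySem.Set Int :=
        PySem.Set.ofList (clusters.values.flatMap (fun i => PySem.List.slice i (some 1) none))
      if found.contains x then clusters
      else
        let clusters :=
          clusters.insert x [(PySem.List.slice (PySem.List.pyGetD data x []) (some 1) none).sum]
        (PySem.List.pyRange x (data.length : Int)).foldl (fun clusters y =>
          if PySem.List.slice (PySem.List.pyGetD data y []) (some 1) none
              == PySem.List.slice (PySem.List.pyGetD data x []) (some 1) none
          then clusters.modify x [] (fun v => v ++ [y]) else clusters) clusters)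
      (PySem.Dict.mk [])
  let soclust := PySem.List.sorted clusters.values id true
  let order := soclust.flatMap (fun i => PySem.List.slice i (some 1) none)
  order.map (fun i => PySem.List.pyGetD data i [])

-- ===== PORT B =====
def order_pamat_alt (data : List (List Int)) : List (List Int) :=
  let n : Int := (data.length : Int)
  let groups : PySem.Dict (List Int) (List Int) :=
    (PySem.List.pyRange 0 n).foldl (fun groups i =>
      groups.modify (PySem.List.slice (PySem.List.pyGetD data i []) (some 1) none) []
        (fun v => v ++ [i])) (PySem.Dict.mk [])
  let clusters :=
    (groups.items.filter (fun p => !(PySem.List.pyGetD p.2 0 0 == n - 1))).map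
      (fun p => [p.1.sum] ++ p.2)
  let clusters := PySem.List.sorted clusters id true
  clusters.flatMap (fun c =>
    (PySem.List.slice c (some 1) none).map (fun i => PySem.List.pyGetD data i []))

-- ===== PRECONDITION & SPEC =====
def Spec_order_pamat (data : List (List Int)) (out : List (List Int)) : Prop := out = order_pamat_alt data
instance (data : List (List Int)) (out : List (List Int)) : Decidable (Spec_order_pamat data out) := by unfold Spec_order_pamat; infer_instance

-- ===== CLAIM (what is proved, stated in full; the proofs are below) =====
def Claim_equal_order_pamat : Prop := ∀ (data : List (List Int)), Dom_order_pamat data → Spec_order_pamat data (order_pamat data)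

-- ===== LEMMAS AND PROOFS =====

-- the tail data[i][1:] of row i
def pvT (data : List (List Int)) (i : Int) : List Int :=
  PySem.List.slice (PySem.List.pyGetD data i []) (some 1) none

theorem pvT_eq (data : List (List Int)) (i : Int) :
    PySem.List.slice (PySem.List.pyGetD data i []) (some 1) none = pvT data i := rfl

-- x is the first row index whose tail is pvT x
def pvFirst (data : List (List Int)) (x : Int) : Bool :=
  (PySem.List.pyRange 0 x).all (fun j => !(pvT data j == pvT data x))

-- all occurrences (from x on) of the tail of row x
def pvOccs (data : List (List Int)) (x : Int) : List Int :=
  (PySem.List.pyRange x (data.length : Int)).filter (fun y => pvT data y == pvT data x)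

-- the common cluster list both programs sort
def pvSpec (data : List (List Int)) : List (List Int) :=
  ((PySem.List.pyRange 0 ((data.length : Int) - 1)).filter (pvFirst data)).map
    (fun x => (pvT data x).sum :: pvOccs data x)

-- small range facts
theorem pv_r_nonpos {a b : Int} (h : b ≤ a) : PySem.List.pyRange a b = [] := by
  simp only [PySem.List.pyRange]
  rw [if_neg (by omega : ¬ (1:Int) = 0)]
  simp only [if_pos (by omega : (0:Int) < 1)]
  rw [if_neg (by omega : ¬ a < b)]
  simp

theorem pv_r_succ (k : Nat) :
    PySem.List.pyRange 0 ((k:Int)+1) = PySem.List.pyRange 0 (k:Int) ++ [(k:Int)] := by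
  rw [PySem.List.pyRange_one_append 0 (k:Int) ((k:Int)+1) (by omega) (by omega)]
  rw [PySem.List.pyRange_one_cons (by omega : (k:Int) < (k:Int)+1)]
  rw [pv_r_nonpos (by omega : (k:Int)+1 ≤ (k:Int)+1)]

theorem pv_r_pairwise (k : Nat) :
    (PySem.List.pyRange 0 (k:Int)).Pairwise (· < ·) := by
  rw [PySem.List.pyRange_zero_natCast]
  rw [List.pairwise_map]
  exact (List.pairwise_lt_range (n := k)).imp (by intro a b h; exact_mod_cast h)

-- generic: find? over a list with pairwise-distinct keys finds the member with the given key
theorem pv_find?_pairwise {α β : Type} [BEq β] [LawfulBEq β] (key : α → β) (l : List α)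
    (h : l.Pairwise (fun a b => key a ≠ key b)) (x : α) (hx : x ∈ l) :
    l.find? (fun y => key y == key x) = some x := by
  induction l with
  | nil => cases hx
  | cons a l ih =>
    rcases List.mem_cons.1 hx with rfl | hx'
    · simp [List.find?]
    · have hne : key a ≠ key x := (List.pairwise_cons.1 h).1 x hx'
      rw [List.find?_cons_of_neg (by simp [hne])]
      exact ih (List.pairwise_cons.1 h).2 hx'

theorem pv_mem_eq_of_pairwise {α β : Type} (key : α → β) (l : List α)
    (h : l.Pairwise (fun a b => key a ≠ key b)) {x j : α} (hx : x ∈ l) (hj : j ∈ l)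
    (hk : key x = key j) : x = j := by
  by_contra hne
  exact h.forall (fun {a b} hab => (fun he => hab he.symm)) hx hj hne hk

-- a first index x' has a tail different from every earlier row's tail
theorem pv_first_ne (data : List (List Int)) {x x' : Int} (h0 : 0 ≤ x) (hx : x < x')
    (h' : pvFirst data x' = true) : pvT data x' ≠ pvT data x := by
  have := (List.all_eq_true.1 h') x (PySem.List.mem_pyRange_one.2 ⟨h0, hx⟩)
  simp only [Bool.not_eq_eq_eq_not, Bool.not_true, beq_eq_false_iff_ne, ne_eq] at this
  exact fun hEq => this hEq.symm

-- the filtered first-occurrence indices have pairwise-distinct tails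
theorem pv_keys_pairwise (data : List (List Int)) (k : Nat) :
    ((PySem.List.pyRange 0 (k:Int)).filter (pvFirst data)).Pairwise
      (fun a b => pvT data a ≠ pvT data b) := by
  have hp : ((PySem.List.pyRange 0 (k:Int)).filter (pvFirst data)).Pairwise (· < ·) :=
    (pv_r_pairwise k).filter _
  refine hp.imp_of_mem ?_
  intro a b ha hb hab
  have ha' := List.mem_filter.1 ha
  have hb' := List.mem_filter.1 hb
  have h0a : 0 ≤ a := (PySem.List.mem_pyRange_one.1 ha'.1).1
  exact fun hEq => (pv_first_ne data h0a hab hb'.2) hEq.symm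

-- a non-first index has a first index below it with the same tail
theorem pv_first_witness (data : List (List Int)) (k : Nat)
    (h : pvFirst data (k:Int) = false) :
    ∃ j : Int, 0 ≤ j ∧ j < (k:Int) ∧ pvFirst data j = true ∧ pvT data j = pvT data (k:Int) := by
  induction k using Nat.strong_induction_on with
  | _ k ih =>
    simp only [pvFirst, List.all_eq_false] at h
    obtain ⟨j, hj, hjt⟩ := h
    have hjr := PySem.List.mem_pyRange_one.1 hj
    have hjt' : pvT data j = pvT data (k:Int) := by simpa using hjt
    by_cases hf : pvFirst data j = true
    · exact ⟨j, hjr.1, hjr.2, hf, hjt'⟩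
    · have hj' : j = ((j.toNat : Nat) : Int) := by omega
      have hlt : j.toNat < k := by omega
      obtain ⟨j', h0, hlt', hf', ht'⟩ := ih j.toNat hlt (by rw [← hj']; simpa using hf)
      exact ⟨j', h0, by omega, hf', by rw [ht', ← hj', hjt']⟩

-- occurrences within the first k rows, as collected by B's grouping pass
def pvOccTo (data : List (List Int)) (k : Nat) (x : Int) : List Int :=
  (PySem.List.pyRange 0 (k:Int)).filter (fun y => pvT data y == pvT data x)

theorem pv_occTo_succ (data : List (List Int)) (k : Nat) (x : Int) :
    pvOccTo data (k+1) x
      = pvOccTo data k x ++ if pvT data (k:Int) == pvT data x then [(k:Int)] else [] := by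
  unfold pvOccTo
  rw [show (((k+1:Nat)):Int) = (k:Int)+1 by push_cast; ring, pv_r_succ k, List.filter_append]
  simp [List.filter_cons]

theorem pv_occTo_first_nil (data : List (List Int)) (k : Nat)
    (h : pvFirst data (k:Int) = true) : pvOccTo data k (k:Int) = [] := by
  unfold pvOccTo
  rw [List.filter_eq_nil_iff]
  intro y hy
  have hyr := PySem.List.mem_pyRange_one.1 hy
  simpa using fun hEq => pv_first_ne data hyr.1 hyr.2 h hEq.symm

-- what modify does to the underlying association list (top-level rewriting form)
theorem pv_items_modify {κ ν : Type} [BEq κ] (d : PySem.Dict κ ν) (key : κ) (dflt : ν)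
    (f : ν → ν) :
    (d.modify key dflt f).items =
      if d.items.any (fun p => p.1 == key) = true then
        d.items.map (fun p => if p.1 == key then
          (key, f ((Option.map Prod.snd (d.items.find? (fun p => p.1 == key))).getD dflt))
          else p)
      else
        d.items ++
          [(key, f ((Option.map Prod.snd (d.items.find? (fun p => p.1 == key))).getD dflt))] := by
  simp only [PySem.Dict.modify, PySem.Dict.insert, PySem.Dict.getD, PySem.Dict.get?,
    PySem.Dict.contains]
  split_ifs <;> rfl

-- insert of a fresh key appends
theorem pv_insert_new {κ ν : Type} [BEq κ] (d : PySem.Dict κ ν) (key : κ) (v : ν)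
    (h : d.items.any (fun p => p.1 == key) = false) :
    d.insert key v = PySem.Dict.mk (d.items ++ [(key, v)]) := by
  simp only [PySem.Dict.insert, PySem.Dict.contains]
  rw [if_neg (by simp [h])]

-- ===== B-side invariant =====
theorem pvB_inv (data : List (List Int)) (k : Nat) :
    ((PySem.List.pyRange 0 (k:Int)).foldl (fun groups i =>
        groups.modify (PySem.List.slice (PySem.List.pyGetD data i []) (some 1) none) []
          (fun v => v ++ [i])) (PySem.Dict.mk [])).items
      = ((PySem.List.pyRange 0 (k:Int)).filter (pvFirst data)).map
          (fun x => (pvT data x, pvOccTo data k x)) := by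
  induction k with
  | zero => simp [pv_r_nonpos (le_refl (0:Int))]
  | succ k ih =>
    have hpair := pv_keys_pairwise data k
    rw [show (((k+1:Nat)):Int) = (k:Int)+1 by push_cast; ring, pv_r_succ k,
      List.foldl_append, List.filter_append]
    simp only [List.foldl_cons, List.foldl_nil]
    rw [pv_items_modify, ih]
    simp only [pvT_eq, List.find?_map, List.any_map]
    by_cases h1 : pvFirst data (k:Int) = true
    · -- new tail: appended at the end of the dict
      have hnone :
          ((PySem.List.pyRange 0 (k:Int)).filter (pvFirst data)).find?
            ((fun p => p.1 == pvT data (k:Int)) ∘ (fun x => (pvT data x, pvOccTo data k x)))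
            = none := by
        rw [List.find?_eq_none]
        intro x hx
        have hx' := List.mem_filter.1 hx
        have hxr := PySem.List.mem_pyRange_one.1 hx'.1
        simpa using fun hEq => pv_first_ne data hxr.1 hxr.2 h1 hEq.symm
      have hany :
          ((PySem.List.pyRange 0 (k:Int)).filter (pvFirst data)).any
            ((fun p => p.1 == pvT data (k:Int)) ∘ (fun x => (pvT data x, pvOccTo data k x)))
            = false := by
        rw [List.any_eq_false]
        intro x hx
        have hx' := List.mem_filter.1 hx
        have hxr := PySem.List.mem_pyRange_one.1 hx'.1
        simpa using fun hEq => pv_first_ne data hxr.1 hxr.2 h1 hEq.symm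
      rw [hnone, hany]
      simp only [Bool.false_eq_true, if_false, Option.map_none, Option.getD_none,
        List.filter_cons, h1, if_true, List.filter_nil, List.map_append]
      congr 1
      · refine List.map_congr_left ?_
        intro x hx
        have hx' := List.mem_filter.1 hx
        have hxr := PySem.List.mem_pyRange_one.1 hx'.1
        rw [pv_occTo_succ]
        rw [if_neg (by simpa using pv_first_ne data hxr.1 hxr.2 h1)]
        simp
      · simp only [List.map_cons, List.map_nil]
        rw [pv_occTo_succ, pv_occTo_first_nil data k h1]
        simp
    · -- existing tail: overwritten in place
      have h1' : pvFirst data (k:Int) = false := by simpa using h1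
      obtain ⟨j, hj0, hjk, hjf, hjt⟩ := pv_first_witness data k h1'
      have hjmem : j ∈ (PySem.List.pyRange 0 (k:Int)).filter (pvFirst data) :=
        List.mem_filter.2 ⟨PySem.List.mem_pyRange_one.2 ⟨hj0, hjk⟩, hjf⟩
      have hfind :
          ((PySem.List.pyRange 0 (k:Int)).filter (pvFirst data)).find?
            ((fun p => p.1 == pvT data (k:Int)) ∘ (fun x => (pvT data x, pvOccTo data k x)))
            = some j := by
        have h0 := pv_find?_pairwise (pvT data) _ hpair j hjmem
        rw [← h0]
        congr 1
        funext x
        simp [hjt]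
      have hany :
          ((PySem.List.pyRange 0 (k:Int)).filter (pvFirst data)).any
            ((fun p => p.1 == pvT data (k:Int)) ∘ (fun x => (pvT data x, pvOccTo data k x)))
            = true := by
        rw [List.any_eq_true]
        exact ⟨j, hjmem, by simp [hjt]⟩
      rw [hfind, hany]
      simp only [if_true, Option.map_some, Option.getD_some, List.filter_cons, h1',
        Bool.false_eq_true, if_false, List.filter_nil, List.append_nil, List.map_map]
      refine List.map_congr_left ?_
      intro x hxmem
      simp only [Function.comp]
      by_cases hxk : pvT data x = pvT data (k:Int)
      · have hxj : x = j :=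
          pv_mem_eq_of_pairwise (pvT data) _ hpair hxmem hjmem (hxk.trans hjt.symm)
        subst hxj
        rw [if_pos (by simpa using hxk)]
        rw [pv_occTo_succ]
        rw [if_pos (by simp [hjt])]
        rw [hjt]
      · rw [if_neg (by simpa using hxk)]
        rw [pv_occTo_succ]
        rw [if_neg (by simpa using fun hEq => hxk hEq.symm)]
        simp

-- ===== A-side inner loop =====
theorem pvA_inner (data : List (List Int)) (xk : Int) (ys : List Int)
    (L : List (Int × List Int)) (hL : ∀ p ∈ L, p.1 ≠ xk) (v : List Int) :
    (ys.foldl (fun clusters y =>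
        if PySem.List.slice (PySem.List.pyGetD data y []) (some 1) none
            == PySem.List.slice (PySem.List.pyGetD data xk []) (some 1) none
        then clusters.modify xk [] (fun v => v ++ [y]) else clusters)
      (PySem.Dict.mk (L ++ [(xk, v)]))).items
    = L ++ [(xk, v ++ ys.filter (fun y => pvT data y == pvT data xk))] := by
  induction ys generalizing v with
  | nil => simp
  | cons y ys ih =>
    simp only [List.foldl_cons]
    by_cases hy : (PySem.List.slice (PySem.List.pyGetD data y []) (some 1) none
        == PySem.List.slice (PySem.List.pyGetD data xk []) (some 1) none) = true
    · rw [if_pos hy]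
      have hy' : (pvT data y == pvT data xk) = true := hy
      have hmod : (PySem.Dict.mk (L ++ [(xk, v)]) : PySem.Dict Int (List Int)).modify xk []
          (fun v => v ++ [y]) = PySem.Dict.mk (L ++ [(xk, v ++ [y])]) := by
        simp only [PySem.Dict.modify, PySem.Dict.insert, PySem.Dict.getD, PySem.Dict.get?,
          PySem.Dict.contains]
        rw [List.find?_append, List.find?_eq_none.2 (fun p hp => by simp [hL p hp])]
        rw [if_pos (by simp [List.any_append])]
        simp only [Option.none_or, List.find?_cons, beq_self_eq_true,
          Option.map_some, Option.getD_some, List.map_append]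
        congr 2
        · have hid : ∀ p ∈ L, (if (p.1 == xk) = true then (xk, v ++ [y]) else p) = id p := by
            intro p hp
            rw [if_neg (by simp [hL p hp])]
            rfl
          rw [List.map_congr_left hid, List.map_id]
        · simp
      rw [hmod, ih (v ++ [y])]
      rw [List.filter_cons, if_pos hy']
      simp
    · rw [if_neg hy]
      have hy' : (pvT data y == pvT data xk) = false := by simpa using hy
      rw [ih v]
      rw [List.filter_cons, if_neg (by simp [hy'])]

-- ===== A-side invariant =====
theorem pvA_inv (data : List (List Int)) (k : Nat)
    (hk : (k:Int) ≤ (data.length : Int) - 1) :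
    ((PySem.List.pyRange 0 (k:Int)).foldl (fun clusters x =>
      let found : PySem.Set Int :=
        PySem.Set.ofList (clusters.values.flatMap (fun i => PySem.List.slice i (some 1) none))
      if found.contains x then clusters
      else
        let clusters :=
          clusters.insert x [(PySem.List.slice (PySem.List.pyGetD data x []) (some 1) none).sum]
        (PySem.List.pyRange x (data.length : Int)).foldl (fun clusters y =>
          if PySem.List.slice (PySem.List.pyGetD data y []) (some 1) none
              == PySem.List.slice (PySem.List.pyGetD data x []) (some 1) none
          then clusters.modify x [] (fun v => v ++ [y]) else clusters) clusters)
      (PySem.Dict.mk [])).items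
    = ((PySem.List.pyRange 0 (k:Int)).filter (pvFirst data)).map
        (fun x => (x, (pvT data x).sum :: pvOccs data x)) := by
  induction k with
  | zero => simp [pv_r_nonpos (le_refl (0:Int))]
  | succ k ih =>
    have ih' := ih (by omega)
    rw [show (((k+1:Nat)):Int) = (k:Int)+1 by push_cast; ring, pv_r_succ k,
      List.foldl_append, List.filter_append]
    simp only [List.foldl_cons, List.foldl_nil]
    have hvalues :
        (((PySem.List.pyRange 0 (k:Int)).foldl (fun clusters x =>
          let found : PySem.Set Int :=
            PySem.Set.ofList (clusters.values.flatMap (fun i => PySem.List.slice i (some 1) none))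
          if found.contains x then clusters
          else
            let clusters :=
              clusters.insert x [(PySem.List.slice (PySem.List.pyGetD data x []) (some 1) none).sum]
            (PySem.List.pyRange x (data.length : Int)).foldl (fun clusters y =>
              if PySem.List.slice (PySem.List.pyGetD data y []) (some 1) none
                  == PySem.List.slice (PySem.List.pyGetD data x []) (some 1) none
              then clusters.modify x [] (fun v => v ++ [y]) else clusters) clusters)
          (PySem.Dict.mk [])).values.flatMap (fun i => PySem.List.slice i (some 1) none))
        = ((PySem.List.pyRange 0 (k:Int)).filter (pvFirst data)).flatMap (pvOccs data) := by
      rw [PySem.Dict.values, ih', List.map_map, List.flatMap_def, List.flatMap_def,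
        List.map_map]
      congr 1
      refine List.map_congr_left ?_
      intro x hx
      simp only [Function.comp]
      rw [PySem.List.slice_from _ (by omega : (0:Int) ≤ 1)]
      simp
    by_cases h1 : pvFirst data (k:Int) = true
    · -- row k starts a new cluster, filled completely by the inner loop
      have hcon :
          (PySem.Set.ofList
            ((((PySem.List.pyRange 0 (k:Int)).foldl (fun clusters x =>
              let found : PySem.Set Int :=
                PySem.Set.ofList (clusters.values.flatMap (fun i => PySem.List.slice i (some 1) none))
              if found.contains x then clusters
              else
                let clusters :=
                  clusters.insert x [(PySem.List.slice (PySem.List.pyGetD data x []) (some 1) none).sum]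
                (PySem.List.pyRange x (data.length : Int)).foldl (fun clusters y =>
                  if PySem.List.slice (PySem.List.pyGetD data y []) (some 1) none
                      == PySem.List.slice (PySem.List.pyGetD data x []) (some 1) none
                  then clusters.modify x [] (fun v => v ++ [y]) else clusters) clusters)
              (PySem.Dict.mk [])).values).flatMap
                (fun i => PySem.List.slice i (some 1) none))).contains (k:Int) = false := by
        rw [hvalues]
        rw [← Bool.not_eq_true, PySem.Set.contains_iff, PySem.Set.mem_ofList]
        intro hmem
        obtain ⟨x, hx, hkx⟩ := List.mem_flatMap.1 hmem
        have hx' := List.mem_filter.1 hx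
        have hxr := PySem.List.mem_pyRange_one.1 hx'.1
        have hkx' := List.mem_filter.1 hkx
        have : pvT data (k:Int) = pvT data x := by simpa using hkx'.2
        exact pv_first_ne data hxr.1 hxr.2 h1 this
      rw [hcon]
      simp only [Bool.false_eq_true, if_false]
      have hfresh :
          (((PySem.List.pyRange 0 (k:Int)).foldl (fun clusters x =>
            let found : PySem.Set Int :=
              PySem.Set.ofList (clusters.values.flatMap (fun i => PySem.List.slice i (some 1) none))
            if found.contains x then clusters
            else
              let clusters :=
                clusters.insert x [(PySem.List.slice (PySem.List.pyGetD data x []) (some 1) none).sum]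
              (PySem.List.pyRange x (data.length : Int)).foldl (fun clusters y =>
                if PySem.List.slice (PySem.List.pyGetD data y []) (some 1) none
                    == PySem.List.slice (PySem.List.pyGetD data x []) (some 1) none
                then clusters.modify x [] (fun v => v ++ [y]) else clusters) clusters)
            (PySem.Dict.mk [])).items.any (fun p => p.1 == (k:Int))) = false := by
        rw [ih', List.any_map, List.any_eq_false]
        intro x hx
        have hx' := List.mem_filter.1 hx
        have hxr := PySem.List.mem_pyRange_one.1 hx'.1
        have hne : x ≠ (k:Int) := by omega
        simpa using hne
      rw [pv_insert_new _ _ _ hfresh, ih']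
      rw [pvA_inner data (k:Int) _ _
        (by
          intro p hp
          obtain ⟨x, hx, rfl⟩ := List.mem_map.1 hp
          have hx' := List.mem_filter.1 hx
          have hxr := PySem.List.mem_pyRange_one.1 hx'.1
          simp only
          omega) _]
      rw [List.filter_cons, if_pos h1]
      simp [pvT, pvOccs]
    · -- row k was already captured in an earlier cluster
      have h1' : pvFirst data (k:Int) = false := by simpa using h1
      obtain ⟨j, hj0, hjk, hjf, hjt⟩ := pv_first_witness data k h1'
      have hcon :
          (PySem.Set.ofList
            ((((PySem.List.pyRange 0 (k:Int)).foldl (fun clusters x =>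
              let found : PySem.Set Int :=
                PySem.Set.ofList (clusters.values.flatMap (fun i => PySem.List.slice i (some 1) none))
              if found.contains x then clusters
              else
                let clusters :=
                  clusters.insert x [(PySem.List.slice (PySem.List.pyGetD data x []) (some 1) none).sum]
                (PySem.List.pyRange x (data.length : Int)).foldl (fun clusters y =>
                  if PySem.List.slice (PySem.List.pyGetD data y []) (some 1) none
                      == PySem.List.slice (PySem.List.pyGetD data x []) (some 1) none
                  then clusters.modify x [] (fun v => v ++ [y]) else clusters) clusters)
              (PySem.Dict.mk [])).values).flatMap
                (fun i => PySem.List.slice i (some 1) none))).contains (k:Int) = true := by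
        rw [hvalues]
        rw [PySem.Set.contains_iff, PySem.Set.mem_ofList]
        refine List.mem_flatMap.2 ⟨j, List.mem_filter.2
          ⟨PySem.List.mem_pyRange_one.2 ⟨hj0, hjk⟩, hjf⟩, ?_⟩
        refine List.mem_filter.2 ⟨PySem.List.mem_pyRange_one.2 ⟨by omega, by omega⟩, ?_⟩
        simp [hjt]
      rw [hcon]
      simp only [if_true]
      rw [ih', List.filter_cons, if_neg (by simp [h1']), List.filter_nil, List.append_nil]

theorem pvA_clusters (data : List (List Int)) :
    ((PySem.List.pyRange 0 ((data.length : Int) - 1)).foldl (fun clusters x =>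
      let found : PySem.Set Int :=
        PySem.Set.ofList (clusters.values.flatMap (fun i => PySem.List.slice i (some 1) none))
      if found.contains x then clusters
      else
        let clusters :=
          clusters.insert x [(PySem.List.slice (PySem.List.pyGetD data x []) (some 1) none).sum]
        (PySem.List.pyRange x (data.length : Int)).foldl (fun clusters y =>
          if PySem.List.slice (PySem.List.pyGetD data y []) (some 1) none
              == PySem.List.slice (PySem.List.pyGetD data x []) (some 1) none
          then clusters.modify x [] (fun v => v ++ [y]) else clusters) clusters)
      (PySem.Dict.mk [])).values = pvSpec data := by
  by_cases hn : data.length = 0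
  · obtain rfl : data = [] := List.length_eq_zero_iff.1 hn
    simp [pvSpec, pv_r_nonpos (by omega : (-1:Int) ≤ 0), PySem.Dict.values]
  · have hn1 : 1 ≤ data.length := Nat.one_le_iff_ne_zero.2 hn
    have hr : PySem.List.pyRange 0 ((data.length : Int) - 1)
        = PySem.List.pyRange 0 ((((data.length : Int) - 1).toNat : Int)) := by
      rw [Int.toNat_of_nonneg (by omega)]
    rw [PySem.Dict.values, hr, pvA_inv data ((data.length : Int) - 1).toNat (by omega)]
    rw [pvSpec, hr, List.map_map]
    rfl

theorem pvB_clusters (data : List (List Int)) :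
    (((PySem.List.pyRange 0 (data.length : Int)).foldl (fun groups i =>
        groups.modify (PySem.List.slice (PySem.List.pyGetD data i []) (some 1) none) []
          (fun v => v ++ [i])) (PySem.Dict.mk [])).items.filter
        (fun p => !(PySem.List.pyGetD p.2 0 0 == (data.length : Int) - 1))).map
      (fun p => [p.1.sum] ++ p.2) = pvSpec data := by
  rw [pvB_inv data data.length, List.filter_map, List.map_map]
  by_cases hn : data.length = 0
  · obtain rfl : data = [] := List.length_eq_zero_iff.1 hn
    simp [pvSpec, pv_r_nonpos (by omega : (-1:Int) ≤ 0), pv_r_nonpos (le_refl (0:Int))]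
  · have hn1 : 1 ≤ data.length := Nat.one_le_iff_ne_zero.2 hn
    -- for a first occurrence x, its group is exactly pvOccs x, which starts with x itself
    have hocc : ∀ x : Int, 0 ≤ x → x < (data.length : Int) → pvFirst data x = true →
        pvOccTo data data.length x = pvOccs data x := by
      intro x h0 hxn hf
      unfold pvOccTo pvOccs
      rw [PySem.List.pyRange_one_append 0 x (data.length : Int) h0 (le_of_lt hxn),
        List.filter_append]
      rw [List.filter_eq_nil_iff.2 (fun y hy => by
        have := (List.all_eq_true.1 hf) y hy
        simpa using this)]
      simp
    have hhead : ∀ x : Int, 0 ≤ x → x < (data.length : Int) →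
        pvOccs data x = x :: ((PySem.List.pyRange (x+1) (data.length : Int)).filter
          (fun y => pvT data y == pvT data x)) := by
      intro x h0 hxn
      unfold pvOccs
      rw [PySem.List.pyRange_one_cons hxn, List.filter_cons, if_pos (by simp)]
    -- the filter keeps exactly the first occurrences below the last row
    have hcong : ∀ x ∈ (PySem.List.pyRange 0 ((data.length : Nat) : Int)).filter
        (pvFirst data),
        ((fun p => !(PySem.List.pyGetD p.2 0 0 == (data.length : Int) - 1)) ∘
          (fun x => (pvT data x, pvOccTo data data.length x))) x
          = !((x : Int) == (data.length : Int) - 1) := by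
      intro x hx
      have hx' := List.mem_filter.1 hx
      have hxr := PySem.List.mem_pyRange_one.1 hx'.1
      simp only [Function.comp]
      rw [hocc x hxr.1 hxr.2 hx'.2, hhead x hxr.1 hxr.2]
      rw [PySem.List.pyGetD_ofNat']
      simp
    rw [List.filter_congr hcong]
    rw [List.filter_filter]
    have hsplit : PySem.List.pyRange 0 ((data.length : Nat) : Int)
        = PySem.List.pyRange 0 ((data.length : Int) - 1) ++ [(data.length : Int) - 1] := by
      rw [PySem.List.pyRange_one_append 0 ((data.length : Int) - 1) (data.length : Int)
        (by omega) (by omega)]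
      rw [PySem.List.pyRange_one_cons (by omega : (data.length : Int) - 1 < (data.length : Int))]
      rw [pv_r_nonpos (by omega : (data.length : Int) ≤ (data.length : Int) - 1 + 1)]
    rw [hsplit, List.filter_append]
    rw [List.filter_cons]
    rw [if_neg (by simp)]
    rw [List.filter_nil, List.append_nil]
    have hcong2 : ∀ x ∈ PySem.List.pyRange 0 ((data.length : Int) - 1),
        (!((x : Int) == (data.length : Int) - 1) && pvFirst data x) = pvFirst data x := by
      intro x hx
      have hxr := PySem.List.mem_pyRange_one.1 hx
      have hne : x ≠ (data.length : Int) - 1 := by omega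
      simp [hne]
    rw [List.filter_congr hcong2]
    rw [pvSpec]
    refine List.map_congr_left ?_
    intro x hx
    have hx' := List.mem_filter.1 hx
    have hxr := PySem.List.mem_pyRange_one.1 hx'.1
    simp only [Function.comp]
    rw [hocc x hxr.1 (by omega) hx'.2]
    simp

-- ===== VERDICT (by name: the statement is the Claim_ definition above) =====
theorem order_pamat_spec : Claim_equal_order_pamat := by
  intro data _
  unfold Spec_order_pamat order_pamat order_pamat_alt
  simp only []
  rw [pvA_clusters, pvB_clusters]
  simp [List.map_flatMap]
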